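-- pv_equiv track=rewrite | github.com/jonas-skywalker/hurricane-compiler | src/parser/lexer.py | split_symbols
-- ===== SOURCE A (Python) =====
-- def split_surround(source, c, label):
--     spl = source.split(c)
--     ret = []
--     for s in spl:
--         ret += [(s, None), (c, label)]
--     return ret[:-1]
--
-- def split_symbols(source):
--     labels = [
--         (" ", "space"),
--         ("\n", "space"),
--         (";", "semicolon"),
--         ("{", "open_bracket"),
--         ("}", "closed_bracket"),
--         ("(", "open_bracket"),
--         (")", "closed_bracket"),
--         ("<=", "smaller_equals"),
--         (">=", "bigger_equals"),
--         ("==", "equals"),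
--         ("=", "assign"),
--         ("+", "plus"),
--         ("-", "minus"),
--         ("*", "multi"),
--         ("/", "div")
--     ]
--     sources = [(source, None)]
--     for (c, label) in labels:
--         new_sources = []
--         for (split_word, matched_label) in sources:
--             if matched_label:
--                 new_sources.append((split_word, matched_label))
--             else:
--                 new_sources += split_surround(split_word, c, label)
--         sources = new_sources
--     return sources
-- ===== SOURCE B (Python) =====
-- LABELS = [
--     (" ", "space"),
--     ("\n", "space"),
--     (";", "semicolon"),
--     ("{", "open_bracket"),
--     ("}", "closed_bracket"),
--     ("(", "open_bracket"),
--     (")", "closed_bracket"),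
--     ("<=", "smaller_equals"),
--     (">=", "bigger_equals"),
--     ("==", "equals"),
--     ("=", "assign"),
--     ("+", "plus"),
--     ("-", "minus"),
--     ("*", "multi"),
--     ("/", "div"),
-- ]
--
--
-- def split_symbols(source):
--     # One left-to-right scan: at each position take the first symbol (in
--     # LABELS order) that matches; buffered text between symbols becomes a
--     # (fragment, None) token.
--     out = []
--     buf = []
--     i = 0
--     n = len(source)
--     while i < n:
--         for sym, label in LABELS:
--             if source.startswith(sym, i):
--                 out.append(("".join(buf), None))
--                 out.append((sym, label))
--                 buf = []
--                 i += len(sym)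
--                 break
--         else:
--             buf.append(source[i])
--             i += 1
--     out.append(("".join(buf), None))
--     return out
-- ===== Notes on version B (the rewrite author's own statement) =====
-- stated objective: alternative
-- what changed: A makes fifteen successive passes, re-splitting every unmatched fragment on each symbol and rebuilding the token list each time; B tokenizes in a single left-to-right scan that tries the symbols in priority order at each position and flushes a character buffer when one matches.
import Mathlib
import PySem

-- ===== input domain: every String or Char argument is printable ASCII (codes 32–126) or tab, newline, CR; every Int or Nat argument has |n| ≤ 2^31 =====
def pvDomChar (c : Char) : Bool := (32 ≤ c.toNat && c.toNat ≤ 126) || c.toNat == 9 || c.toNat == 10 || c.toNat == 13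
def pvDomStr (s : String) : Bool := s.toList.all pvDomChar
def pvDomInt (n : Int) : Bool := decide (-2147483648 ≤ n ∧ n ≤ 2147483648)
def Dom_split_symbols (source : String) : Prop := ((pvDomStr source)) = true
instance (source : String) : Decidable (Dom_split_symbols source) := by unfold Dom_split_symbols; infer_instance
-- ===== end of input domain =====

-- B replaces A's fifteen split-and-rebuild passes (one per symbol) by a single
-- left-to-right scan that emits tokens as it meets symbols (objective: alternative/faster constant).

-- ===== PORT A =====
-- the symbol table, shared verbatim by both Pythons
def labelsC : List (List Char × String) :=
  [([' '], "space"), (['\n'], "space"), ([';'], "semicolon"),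
   (['{'], "open_bracket"), (['}'], "closed_bracket"),
   (['('], "open_bracket"), ([')'], "closed_bracket"),
   (['<','='], "smaller_equals"), (['>','='], "bigger_equals"),
   (['=','='], "equals"), (['='], "assign"),
   (['+'], "plus"), (['-'], "minus"), (['*'], "multi"), (['/'], "div")]

-- split_surround: split on the separator, interleave (sep, label), drop the last
def splitSurroundC (source : List Char) (sep : List Char) (label : String) :
    List (List Char × Option String) :=
  ((PySem.Chars.splitOn source sep).foldl
    (fun ret s => ret ++ [(s, none), (sep, some label)]) []).dropLast

-- body of A's outer loop: one pass of re-splitting every unmatched fragment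
def passA (sources : List (List Char × Option String)) (p : List Char × String) :
    List (List Char × Option String) :=
  sources.foldl (fun new_sources t =>
    match t.2 with
    | some l => new_sources ++ [(t.1, some l)]
    | none   => new_sources ++ splitSurroundC t.1 p.1 p.2) []

def split_symbols (source : String) : List (String × Option String) :=
  (labelsC.foldl passA [(source.toList, none)]).map (fun t => (String.ofList t.1, t.2))

-- ===== PORT B =====
-- first symbol of the table matching at the current position (B's inner for/else loop)
def firstSym (s : List Char) : Option (List Char × String) :=
  labelsC.find? (fun p => PySem.Chars.startswith s p.1)

-- lemma the recursion cites for termination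
theorem labelsC_pos : ∀ p ∈ labelsC, 0 < p.1.length := by decide

-- B's while loop: buf holds the pending fragment (in reverse), tokens are emitted on a match
def scanGo : List Char → List Char → List (List Char × Option String)
  | [], buf => [(buf.reverse, none)]
  | c :: rest, buf =>
    match h : firstSym (c :: rest) with
    | some (sym, lab) =>
        (buf.reverse, none) :: (sym, some lab) :: scanGo (List.drop sym.length (c :: rest)) []
    | none => scanGo rest (c :: buf)
termination_by s _ => s.length
decreasing_by
  · have hm : (sym, lab) ∈ labelsC := List.mem_of_find?_eq_some (by simpa [firstSym] using h)
    have hp : 0 < sym.length := by simpa using labelsC_pos _ hm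
    simp only [List.length_drop, List.length_cons]
    omega
  · simp

def split_symbols_alt (source : String) : List (String × Option String) :=
  (scanGo source.toList []).map (fun t => (String.ofList t.1, t.2))

-- ===== PRECONDITION & SPEC =====
def Spec_split_symbols (source : String) (out : List (String × Option String)) : Prop := out = split_symbols_alt source
instance (source : String) (out : List (String × Option String)) : Decidable (Spec_split_symbols source out) := by unfold Spec_split_symbols; infer_instance

-- ===== CLAIM (what is proved, stated in full; the proofs are below) =====
def Claim_equal_split_symbols : Prop := ∀ (source : String), Dom_split_symbols source → Spec_split_symbols source (split_symbols source)

-- ===== LEMMAS AND PROOFS =====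

-- structural version of Python's str.split for a nonempty separator:
-- returns (first fragment, remaining fragments)
def split1 (sep : List Char) : List Char → List Char × List (List Char)
  | [] => ([], [])
  | c :: rest =>
    if h : sep ≠ [] ∧ sep.isPrefixOf (c :: rest) then
      let r := split1 sep (List.drop sep.length (c :: rest))
      ([], r.1 :: r.2)
    else
      let r := split1 sep rest
      (c :: r.1, r.2)
termination_by l => l.length
decreasing_by
  · have : 0 < sep.length := by
      cases sep with
      | nil => exact absurd rfl h.1
      | cons a t => simp
    simp only [List.length_drop, List.length_cons]; omega
  · simp

theorem splitOn_go_eq (sep : List Char) (hsep : sep ≠ []) :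
    ∀ fuel l cur acc, l.length < fuel →
      PySem.Chars.splitOn.go sep fuel l cur acc =
        acc.reverse ++ (cur.reverse ++ (split1 sep l).1) :: (split1 sep l).2 := by
  intro fuel
  induction fuel with
  | zero => intro l cur acc h; omega
  | succ fuel ih =>
    intro l cur acc h
    cases l with
    | nil =>
      rw [PySem.Chars.splitOn.go]
      · simp [split1]
      · omega
    | cons c rest =>
      rw [PySem.Chars.splitOn.go]
      by_cases hpf : sep.isPrefixOf (c :: rest)
      · have hlen : 0 < sep.length := List.length_pos_of_ne_nil hsep
        rw [if_pos hpf, ih _ _ _ (by simp at h ⊢; omega)]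
        rw [split1, dif_pos ⟨hsep, hpf⟩]
        simp
      · rw [if_neg hpf, ih _ _ _ (by simp at h ⊢; omega)]
        rw [split1, dif_neg (by tauto)]
        simp

theorem splitOn_eq_split1 (sep l : List Char) (hsep : sep ≠ []) :
    PySem.Chars.splitOn l sep = (split1 sep l).1 :: (split1 sep l).2 := by
  have := splitOn_go_eq sep hsep (l.length + 1) l [] [] (by omega)
  simpa [PySem.Chars.splitOn] using this

-- the interleaving that split_surround builds, in terms of split1
def trailSurr (sep : List Char) (lab : String) (fs : List (List Char)) :
    List (List Char × Option String) :=
  fs.flatMap (fun p => [(sep, some lab), (p, none)])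

theorem splitSurround_eq (s sep : List Char) (lab : String) (hsep : sep ≠ []) :
    splitSurroundC s sep lab =
      ((split1 sep s).1, none) :: trailSurr sep lab (split1 sep s).2 := by
  have aux : ∀ (ps : List (List Char)) (p0 : List Char),
      ((p0 :: ps).flatMap (fun p => [(p, (none : Option String)), (sep, some lab)])).dropLast =
        (p0, none) :: trailSurr sep lab ps := by
    intro ps
    induction ps with
    | nil => intro p0; simp [trailSurr]
    | cons p ps' ih =>
      intro p0
      have h2 : (p :: ps').flatMap (fun p => [(p, (none : Option String)), (sep, some lab)]) ≠ [] := by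
        simp [List.flatMap_cons]
      rw [List.flatMap_cons, List.dropLast_append_of_ne_nil h2, ih]
      simp [trailSurr]
  unfold splitSurroundC
  rw [splitOn_eq_split1 sep s hsep,
    PySem.List.foldl_append_eq_flatMap (fun s => [(s, (none : Option String)), (sep, some lab)])]
  simpa using aux (split1 sep s).2 (split1 sep s).1

-- A's pass as a flatMap
def passFrag (p : List Char × String) (t : List Char × Option String) :
    List (List Char × Option String) :=
  match t.2 with
  | some l => [(t.1, some l)]
  | none   => splitSurroundC t.1 p.1 p.2

theorem passA_eq (ts : List (List Char × Option String)) (p : List Char × String) :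
    passA ts p = ts.flatMap (passFrag p) := by
  unfold passA
  have hb : (fun (new_sources : List (List Char × Option String)) (t : List Char × Option String) =>
      match t.2 with
      | some l => new_sources ++ [(t.1, some l)]
      | none   => new_sources ++ splitSurroundC t.1 p.1 p.2) =
      (fun new_sources t => new_sources ++ passFrag p t) := by
    funext ns t
    rcases t with ⟨w, m⟩
    cases m <;> rfl
  rw [hb, PySem.List.foldl_append_eq_flatMap (passFrag p)]
  simp

-- the fold of all passes
def passesC (L : List (List Char × String)) (ts : List (List Char × Option String)) :
    List (List Char × Option String) :=
  L.foldl passA ts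

theorem passesC_cons (d L ts) : passesC (d :: L) ts = passesC L (passA ts d) := rfl

theorem passesC_append (L : List (List Char × String)) :
    ∀ xs ys, passesC L (xs ++ ys) = passesC L xs ++ passesC L ys := by
  induction L with
  | nil => intro xs ys; rfl
  | cons d L ih =>
    intro xs ys
    rw [passesC_cons, passA_eq, List.flatMap_append, ← passA_eq, ← passA_eq, ih]
    rfl

theorem passesC_matched (L : List (List Char × String)) (w : List Char) (l : String) :
    passesC L [(w, some l)] = [(w, some l)] := by
  induction L with
  | nil => rfl
  | cons d L ih =>
    rw [passesC_cons, passA_eq]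
    simpa [passFrag] using ih

-- no occurrence of sep anywhere in l → split leaves l whole
theorem split1_noocc (sep l : List Char) (h : ∀ j, ¬ sep <+: l.drop j) :
    split1 sep l = (l, []) := by
  fun_induction split1 sep l with
  | case1 => rfl
  | case2 c rest hc r hr =>
    exact absurd ((List.isPrefixOf_iff_prefix).1 hc.2) (by simpa using h 0)
  | case3 c rest hc r ih =>
    have ih' := ih (fun j => by simpa using h (j + 1))
    simp only [r, ih']

theorem passesC_noocc (L : List (List Char × String)) (s : List Char)
    (hne : ∀ p ∈ L, p.1 ≠ [])
    (h : ∀ p ∈ L, ∀ j, ¬ p.1 <+: s.drop j) :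
    passesC L [(s, none)] = [(s, none)] := by
  induction L with
  | nil => rfl
  | cons d L ih =>
    rcases d with ⟨ds, dl⟩
    have hd : ds ≠ [] := hne (ds, dl) (by simp)
    rw [passesC_cons, passA_eq]
    have h1 : [((s : List Char), (none : Option String))].flatMap (passFrag (ds, dl)) =
        splitSurroundC s ds dl := by simp [passFrag]
    rw [h1, splitSurround_eq s ds dl hd, split1_noocc ds s (h (ds, dl) (by simp))]
    simp only [trailSurr, List.flatMap_nil]
    exact ih (fun p hp => hne p (by simp [hp])) (fun p hp => h p (by simp [hp]))

-- first fragment is a prefix of the input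
theorem split1_fst_prefix (sep l : List Char) : (split1 sep l).1 <+: l := by
  fun_induction split1 sep l with
  | case1 => exact List.nil_prefix
  | case2 c rest hc r hr => exact List.nil_prefix
  | case3 c rest hc r ih => simpa [List.cons_prefix_cons] using ih

theorem split1_cons (sep : List Char) (c : Char) (rest : List Char) :
    split1 sep (c :: rest) =
      if sep ≠ [] ∧ sep.isPrefixOf (c :: rest) then
        ([], (split1 sep (List.drop sep.length (c :: rest))).1 ::
             (split1 sep (List.drop sep.length (c :: rest))).2)
      else ((c :: (split1 sep rest).1), (split1 sep rest).2) := by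
  rw [split1]
  split <;> rfl

theorem split1_sep_append (sep rest : List Char) (hsep : sep ≠ []) :
    split1 sep (sep ++ rest) = ([], (split1 sep rest).1 :: (split1 sep rest).2) := by
  cases sep with
  | nil => exact absurd rfl hsep
  | cons s0 sep' =>
    rw [List.cons_append, split1_cons,
      if_pos ⟨hsep, List.isPrefixOf_iff_prefix.2 (by rw [← List.cons_append]; exact List.prefix_append _ _)⟩]
    rw [show List.drop (s0 :: sep').length (s0 :: (sep' ++ rest)) = rest from by
      rw [← List.cons_append]; exact List.drop_left]

-- no sep-occurrence starting inside u → the first fragment swallows u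
theorem split1_late (sep : List Char) (_hsep : sep ≠ []) :
    ∀ (u v : List Char), (∀ j < u.length, ¬ sep <+: (u ++ v).drop j) →
    split1 sep (u ++ v) = (u ++ (split1 sep v).1, (split1 sep v).2) := by
  intro u
  induction u with
  | nil => intro v h; simp
  | cons c u' ih =>
    intro v h
    have hnp : ¬ sep.isPrefixOf (c :: (u' ++ v)) := by
      intro hp
      exact h 0 (by simp) (by simpa using List.isPrefixOf_iff_prefix.1 hp)
    rw [List.cons_append, split1_cons, if_neg (by tauto),
      ih v (fun j hj => by simpa using h (j + 1) (by simpa using hj))]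
    simp

-- splitting a string whose first sep-occurrence is right after pre
theorem split1_first (sep pre rest : List Char) (hsep : sep ≠ [])
    (h : ∀ j < pre.length, ¬ sep <+: (pre ++ sep ++ rest).drop j) :
    split1 sep (pre ++ sep ++ rest) = (pre, (split1 sep rest).1 :: (split1 sep rest).2) := by
  rw [List.append_assoc, split1_late sep hsep pre (sep ++ rest)
    (fun j hj => by simpa [List.append_assoc] using h j hj)]
  rw [split1_sep_append sep rest hsep]
  simp

-- the result of the passes on a single unmatched fragment starts with an unmatched fragment
theorem passesC_head (L : List (List Char × String)) (hne : ∀ p ∈ L, p.1 ≠ []) (w : List Char) :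
    ∃ f ts, passesC L [(w, none)] = (f, none) :: ts ∧ f <+: w := by
  induction L generalizing w with
  | nil => exact ⟨w, [], rfl, List.prefix_refl w⟩
  | cons d L ih =>
    rcases d with ⟨ds, dl⟩
    have hd : ds ≠ [] := hne (ds, dl) (by simp)
    rw [passesC_cons, passA_eq]
    have h1 : [((w : List Char), (none : Option String))].flatMap (passFrag (ds, dl)) =
        splitSurroundC w ds dl := by simp [passFrag]
    rw [h1, splitSurround_eq w ds dl hd]
    have hsplit : ((split1 ds w).1, (none : Option String)) :: trailSurr ds dl (split1 ds w).2 =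
        [((split1 ds w).1, none)] ++ trailSurr ds dl (split1 ds w).2 := rfl
    rw [hsplit, passesC_append]
    obtain ⟨f, ts, hf, hpre⟩ := ih (fun p hp => hne p (by simp [hp])) (split1 ds w).1
    exact ⟨f, ts ++ passesC L (trailSurr ds dl (split1 ds w).2), by rw [hf]; rfl,
      hpre.trans (split1_fst_prefix ds w)⟩

-- prepend a char to the first (unmatched) fragment of a token list
def consTok (c : Char) : List (List Char × Option String) → List (List Char × Option String)
  | (f, none) :: ts => (c :: f, none) :: ts
  | ts => ts

theorem passesC_shift (L : List (List Char × String)) (hne : ∀ p ∈ L, p.1 ≠ [])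
    (c : Char) : ∀ (rest : List Char),
    (∀ p ∈ L, ¬ p.1 <+: (c :: rest)) →
    passesC L [(c :: rest, none)] = consTok c (passesC L [(rest, none)]) := by
  induction L with
  | nil => intro rest h; rfl
  | cons d L ih =>
    intro rest h
    rcases d with ⟨ds, dl⟩
    have hd : ds ≠ [] := hne (ds, dl) (by simp)
    have hne' : ∀ p ∈ L, p.1 ≠ [] := fun p hp => hne p (by simp [hp])
    rw [passesC_cons, passA_eq]
    have h1 : ∀ w : List Char, [(w, (none : Option String))].flatMap (passFrag (ds, dl)) =
        splitSurroundC w ds dl := by intro w; simp [passFrag]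
    rw [h1, splitSurround_eq _ ds dl hd]
    have hnp : ¬ ds.isPrefixOf (c :: rest) := by
      intro hp; exact h (ds, dl) (by simp) (List.isPrefixOf_iff_prefix.1 hp)
    rw [split1_cons, if_neg (by tauto)]
    rw [passesC_cons, passA_eq, h1, splitSurround_eq _ ds dl hd]
    set r := split1 ds rest with hr
    have hv0 : r.1 <+: rest := split1_fst_prefix ds rest
    have hIH : passesC L [(c :: r.1, none)] = consTok c (passesC L [(r.1, none)]) := by
      refine ih hne' r.1 (fun p hp hpre => h p (by simp [hp]) ?_)
      exact hpre.trans (by simpa [List.cons_prefix_cons] using hv0)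
    have e1 : ((c :: r.1, (none : Option String)) :: trailSurr ds dl r.2) =
        [(c :: r.1, none)] ++ trailSurr ds dl r.2 := rfl
    have e2 : ((r.1, (none : Option String)) :: trailSurr ds dl r.2) =
        [(r.1, none)] ++ trailSurr ds dl r.2 := rfl
    rw [e1, e2, passesC_append, passesC_append, hIH]
    obtain ⟨f, ts, hf, _⟩ := passesC_head L hne' r.1
    rw [hf]
    rfl

-- THE SPLIT LEMMA: a symbol occurrence no earlier pass can touch splits the passes' output
theorem passesC_split (sym : List Char) (lab : String) :
    ∀ (L₁ L₂ : List (List Char × String)) (pre rest : List Char),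
    (∀ p ∈ L₁ ++ (sym, lab) :: L₂, p.1 ≠ []) →
    (∀ p ∈ L₁ ++ (sym, lab) :: L₂, ∀ j < pre.length, ¬ p.1 <+: (pre ++ sym ++ rest).drop j) →
    (∀ p ∈ L₁, ∀ j < pre.length + sym.length, ¬ p.1 <+: (pre ++ sym ++ rest).drop j) →
    passesC (L₁ ++ (sym, lab) :: L₂) [(pre ++ sym ++ rest, none)] =
      (pre, none) :: (sym, some lab) :: passesC (L₁ ++ (sym, lab) :: L₂) [(rest, none)] := by
  intro L₁ L₂ pre
  induction L₁ with
  | nil =>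
    intro rest h0 hpre hmid
    simp only [List.nil_append] at *
    have hsym : sym ≠ [] := h0 (sym, lab) (by simp)
    rw [passesC_cons, passA_eq]
    have h1 : ∀ w : List Char, [(w, (none : Option String))].flatMap (passFrag (sym, lab)) =
        splitSurroundC w sym lab := by intro w; simp [passFrag]
    rw [h1, splitSurround_eq _ sym lab hsym,
      split1_first sym pre rest hsym (fun j hj => hpre (sym, lab) (by simp) j hj)]
    have e1 : ((pre : List Char), (none : Option String)) ::
        trailSurr sym lab ((split1 sym rest).1 :: (split1 sym rest).2) =
        [(pre, none)] ++ [(sym, some lab)] ++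
          (((split1 sym rest).1, none) :: trailSurr sym lab (split1 sym rest).2) := by
      simp [trailSurr]
    rw [e1, passesC_append, passesC_append, passesC_matched]
    have hprenoocc : passesC L₂ [(pre, none)] = [(pre, none)] := by
      refine passesC_noocc L₂ pre (fun p hp => h0 p (by simp [hp])) ?_
      intro p hp j
      by_cases hj : j < pre.length
      · intro hcontra
        refine hpre p (by simp [hp]) j hj (hcontra.trans ?_)
        simpa [List.append_assoc] using (List.prefix_append pre (sym ++ rest)).drop j
      · rw [List.drop_eq_nil_of_le (by omega)]
        simp [h0 p (by simp [hp])]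
    rw [hprenoocc, passesC_cons, passA_eq, h1, splitSurround_eq _ sym lab hsym]
    rfl
  | cons d L₁' ih =>
    intro rest h0 hpre hmid
    rcases d with ⟨ds, dl⟩
    have hd : ds ≠ [] := h0 (ds, dl) (by simp)
    set L' := L₁' ++ (sym, lab) :: L₂ with hL'
    have h1 : ∀ w : List Char, [(w, (none : Option String))].flatMap (passFrag (ds, dl)) =
        splitSurroundC w ds dl := by intro w; simp [passFrag]
    rw [show ((ds, dl) :: L₁') ++ (sym, lab) :: L₂ = (ds, dl) :: L' from rfl,
      passesC_cons, passA_eq, h1, splitSurround_eq _ ds dl hd]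
    -- split ds swallows pre ++ sym
    have hds : split1 ds (pre ++ sym ++ rest) =
        ((pre ++ sym) ++ (split1 ds rest).1, (split1 ds rest).2) := by
      have := split1_late ds hd (pre ++ sym) rest ?_
      · simpa using this
      · intro j hj
        exact hmid (ds, dl) (by simp) j (by simpa using hj)
    rw [hds]
    set v0 := (split1 ds rest).1 with hv0
    set vs := (split1 ds rest).2 with hvs
    have hv0p : v0 <+: rest := split1_fst_prefix ds rest
    obtain ⟨tl, htl⟩ := hv0p
    -- transfer hypotheses from pre ++ sym ++ rest down to pre ++ sym ++ v0
    have htrans : ∀ (p : List Char) (j : ℕ),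
        p <+: (pre ++ sym ++ v0).drop j → p <+: (pre ++ sym ++ rest).drop j := by
      intro p j hp
      refine hp.trans ?_
      refine List.IsPrefix.drop ?_ j
      exact ⟨tl, by rw [← htl]; simp⟩
    have hIH := ih v0 (fun p hp => h0 p (by rw [hL'] at hp; simp at hp ⊢; tauto))
      (fun p hp j hj hc => hpre p (by rw [hL'] at hp; simp at hp ⊢; tauto) j hj (htrans _ _ hc))
      (fun p hp j hj hc => hmid p (by simp [hp]) j hj (htrans _ _ hc))
    have e2 : (((pre ++ sym) ++ v0, (none : Option String)) :: trailSurr ds dl vs) =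
        [(pre ++ sym ++ v0, none)] ++ trailSurr ds dl vs := by simp
    rw [e2, passesC_append, hIH]
    -- right-hand side
    rw [show passesC ((ds, dl) :: L') [(rest, none)] = passesC L' (passA [(rest, none)] (ds, dl)) from rfl,
      passA_eq, h1, splitSurround_eq _ ds dl hd]
    have e3 : ((v0, (none : Option String)) :: trailSurr ds dl vs) =
        [(v0, none)] ++ trailSurr ds dl vs := rfl
    rw [← hv0, ← hvs, e3, passesC_append]
    rfl

-- B's scan without the buffer accumulator
def scan : List Char → List (List Char × Option String)
  | [] => [([], none)]
  | c :: rest =>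
    match h : firstSym (c :: rest) with
    | some (sym, lab) => ([], none) :: (sym, some lab) :: scan (List.drop sym.length (c :: rest))
    | none => consTok c (scan rest)
termination_by l => l.length
decreasing_by
  · have hm : (sym, lab) ∈ labelsC := List.mem_of_find?_eq_some (by simpa [firstSym] using h)
    have hp : 0 < sym.length := by simpa using labelsC_pos _ hm
    simp only [List.length_drop, List.length_cons]
    omega
  · simp

theorem scan_cons (c : Char) (rest : List Char) :
    scan (c :: rest) =
      match firstSym (c :: rest) with
      | some (sym, lab) => ([], none) :: (sym, some lab) :: scan (List.drop sym.length (c :: rest))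
      | none => consTok c (scan rest) := by
  rw [scan]
  split <;> rename_i heq <;> rw [heq]

theorem scan_shape (s : List Char) : ∃ f ts, scan s = (f, none) :: ts := by
  fun_induction scan s with
  | case1 => exact ⟨[], [], rfl⟩
  | case2 c rest sym lab h => exact ⟨[], _, rfl⟩
  | case3 c rest h ih =>
    obtain ⟨f, ts, hf⟩ := ih
    exact ⟨c :: f, ts, by rw [hf]; rfl⟩

-- prepend a whole prefix to the first fragment
def consTokL (pre : List Char) : List (List Char × Option String) → List (List Char × Option String)
  | (f, _) :: ts => (pre ++ f, none) :: ts
  | [] => [(pre, none)]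

theorem scanGo_eq (s buf : List Char) : scanGo s buf = consTokL buf.reverse (scan s) := by
  fun_induction scanGo s buf with
  | case1 buf => simp [scan, consTokL]
  | case2 c rest buf sym lab h ih =>
    rw [scan_cons, h]
    obtain ⟨f, ts, hf⟩ := scan_shape (List.drop sym.length (c :: rest))
    simp only [ih, hf, consTokL]
    simp
  | case3 c rest buf h ih =>
    rw [scan_cons, h]
    obtain ⟨f, ts, hf⟩ := scan_shape rest
    simp only [ih, hf, consTokL, consTok]
    simp

theorem labelsC_ne_nil : ∀ p ∈ labelsC, p.1 ≠ [] := by decide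

theorem labelsC_short : ∀ p ∈ labelsC, p.1.length ≤ 2 := by decide

theorem passesC_labels_nil : passesC labelsC [([], none)] = [([], none)] := by
  refine passesC_noocc _ _ labelsC_ne_nil ?_
  intro p hp j h
  rw [List.drop_nil] at h
  exact labelsC_ne_nil p hp (List.prefix_nil.mp h)

-- the decomposition labelsC = L₁ ++ q :: L₂ determines L₁ (labelsC has no duplicate entries)
theorem L1_determined (L₁ L₂ : List (List Char × String)) (q : List Char × String) (k : Nat)
    (hdec : labelsC = L₁ ++ q :: L₂)
    (hk : ∀ m < 15, labelsC[m]? = some q → m = k) :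
    L₁ = labelsC.take k := by
  have hlen : L₁.length < 15 := by
    have := congrArg List.length hdec
    simp [labelsC] at this
    omega
  have hq : labelsC[L₁.length]? = some q := by
    rw [hdec, List.getElem?_append_right (le_refl _)]
    simp
  have hkk := hk _ hlen hq
  rw [hdec, ← hkk, List.take_left]

theorem passes_eq_scan_aux : ∀ n, ∀ s : List Char, s.length ≤ n →
    passesC labelsC [(s, none)] = scan s := by
  intro n
  induction n with
  | zero =>
    intro s hs
    have hsn : s = [] := by
      cases s with
      | nil => rfl
      | cons a b => simp at hs
    subst hsn
    rw [passesC_labels_nil, scan]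
  | succ n ih =>
    intro s hs
    cases s with
    | nil => rw [passesC_labels_nil, scan]
    | cons c rest =>
      cases hfs : firstSym (c :: rest) with
      | none =>
        have hnf : ∀ p ∈ labelsC, ¬ p.1 <+: (c :: rest) := by
          intro p hp hpre
          have hx := List.find?_eq_none.mp
            (show labelsC.find? (fun p => PySem.Chars.startswith (c :: rest) p.1) = none from hfs) p hp
          have hy := List.isPrefixOf_iff_prefix.2 hpre
          simp [PySem.Chars.startswith] at hx
          simp [hx] at hy
        rw [scan_cons, hfs, passesC_shift labelsC labelsC_ne_nil c rest hnf,
          ih rest (by simp at hs; omega)]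
      | some q =>
        rcases q with ⟨sym, lab⟩
        have hfs' : labelsC.find? (fun p => PySem.Chars.startswith (c :: rest) p.1) =
            some (sym, lab) := by simpa [firstSym] using hfs
        rw [List.find?_eq_some_iff_append] at hfs'
        obtain ⟨hsw, L₁, L₂, hdec, hL₁⟩ := hfs'
        have hsymp : sym <+: (c :: rest) :=
          List.isPrefixOf_iff_prefix.1 (by simpa [PySem.Chars.startswith] using hsw)
        obtain ⟨t, ht⟩ := hsymp
        have hmem : (sym, lab) ∈ labelsC := by rw [hdec]; simp
        have hslen : sym.length ≤ 2 := labelsC_short _ hmem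
        have hL1' : ∀ p ∈ L₁, ¬ p.1 <+: (c :: rest) := by
          intro p hp hpre
          have hx := hL₁ p hp
          have hy := List.isPrefixOf_iff_prefix.2 hpre
          simp [PySem.Chars.startswith] at hx
          simp [hx] at hy
        have hchar : sym.length = 2 → ∀ p ∈ L₁, ¬ p.1 <+: (c :: rest).drop 1 := by
          intro hlen2 p hp
          have h3 : sym = ['<','='] ∨ sym = ['>','='] ∨ sym = ['=','='] := by
            have hall : ∀ q ∈ labelsC, q.1.length = 2 →
                q.1 = ['<','='] ∨ q.1 = ['>','='] ∨ q.1 = ['=','='] := by decide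
            exact hall _ hmem hlen2
          rw [← ht]
          rcases h3 with h3 | h3 | h3 <;> subst h3
          · have hlab : lab = "smaller_equals" := by simpa [labelsC] using hmem
            subst hlab
            have hL1 : L₁ = labelsC.take 7 := L1_determined L₁ L₂ _ 7 hdec (by decide)
            rw [hL1] at hp
            simp only [labelsC, List.take] at hp
            fin_cases hp <;> simp [List.cons_prefix_cons]
          · have hlab : lab = "bigger_equals" := by simpa [labelsC] using hmem
            subst hlab
            have hL1 : L₁ = labelsC.take 8 := L1_determined L₁ L₂ _ 8 hdec (by decide)
            rw [hL1] at hp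
            simp only [labelsC, List.take] at hp
            fin_cases hp <;> simp [List.cons_prefix_cons]
          · have hlab : lab = "equals" := by simpa [labelsC] using hmem
            subst hlab
            have hL1 : L₁ = labelsC.take 9 := L1_determined L₁ L₂ _ 9 hdec (by decide)
            rw [hL1] at hp
            simp only [labelsC, List.take] at hp
            fin_cases hp <;> simp [List.cons_prefix_cons]
        have hmid : ∀ p ∈ L₁, ∀ j < ([] : List Char).length + sym.length,
            ¬ p.1 <+: (([] : List Char) ++ sym ++ t).drop j := by
          intro p hp j hj
          simp only [List.length_nil, Nat.zero_add] at hj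
          simp only [List.nil_append]
          rw [ht]
          match j with
          | 0 => simpa using hL1' p hp
          | 1 => exact hchar (by omega) p hp
          | (j+2) => omega
        have hsplit := passesC_split sym lab L₁ L₂ [] t
          (fun p hp => labelsC_ne_nil p (by rw [hdec]; exact hp))
          (fun p hp j hj => by simp at hj) hmid
        rw [← hdec] at hsplit
        simp only [List.nil_append, ht] at hsplit
        have hteq : t = List.drop sym.length (c :: rest) := by
          rw [← ht, List.drop_left]
        have hlt : t.length ≤ n := by
          have hle := congrArg List.length ht
          have hpos : 0 < sym.length :=
            List.length_pos_of_ne_nil (labelsC_ne_nil _ hmem)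
          simp at hle hs
          omega
        rw [hsplit, scan_cons, hfs, ih t hlt, hteq]

-- MAIN: the fifteen passes compute exactly the single scan
theorem passes_eq_scan (s : List Char) : passesC labelsC [(s, none)] = scan s :=
  passes_eq_scan_aux s.length s le_rfl

-- ===== VERDICT (by name: the statement is the Claim_ definition above) =====
theorem split_symbols_spec : Claim_equal_split_symbols := by
  intro source _
  unfold Spec_split_symbols split_symbols split_symbols_alt
  have h1 : labelsC.foldl passA [(source.toList, none)] = passesC labelsC [(source.toList, none)] := rfl
  rw [h1, passes_eq_scan, scanGo_eq]
  obtain ⟨f, ts, hf⟩ := scan_shape source.toList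
  rw [hf]
  rfl
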